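-- pv_equiv track=rewrite | github.com/fenghaitao/simics-7-packages-2025-38-linux64 | simics-qsp-x86-7.38.0/src/devices/ICH10/test/usb/ehci_common.py | calc_bp_values
-- ===== SOURCE A (Python) =====
-- def calc_bp_values(data_base, c_page, total, offset):
--     assert offset < 4096 and c_page < 5
--     assert total <= ((5 - c_page) * 4096 - offset)
--     bp = [0] * 5
--     for p in range(c_page, 5):
--         bp[p] = (data_base & 0xFFFFF000, bp[p - 1] + 0x1000)[p > c_page]
--         len = 4096 - (0, offset)[p == c_page]
--         if total <= len: break
--         else: total -= len
--     return bp
-- ===== SOURCE B (Python) =====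
-- def calc_bp_values(data_base, c_page, total, offset):
--     assert offset < 4096 and c_page < 5
--     assert total <= ((5 - c_page) * 4096 - offset)
--     base = data_base & 0xFFFFF000
--     first = 4096 - offset
--     count = 1 if total <= first else 1 - (-(total - first) // 4096)
--     bp = [0] * 5
--     for i in range(count):
--         bp[c_page + i] = base + 0x1000 * i
--     return bp
-- ===== Notes on version B (the rewrite author's own statement) =====
-- stated objective: alternative
-- what changed: B replaces A's accumulate-and-subtract loop with break (each page value chained from the previous list slot) by a closed-form ceiling-division page count and a direct fill of bp[c_page+i] = base + 0x1000*i.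
import Mathlib
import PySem

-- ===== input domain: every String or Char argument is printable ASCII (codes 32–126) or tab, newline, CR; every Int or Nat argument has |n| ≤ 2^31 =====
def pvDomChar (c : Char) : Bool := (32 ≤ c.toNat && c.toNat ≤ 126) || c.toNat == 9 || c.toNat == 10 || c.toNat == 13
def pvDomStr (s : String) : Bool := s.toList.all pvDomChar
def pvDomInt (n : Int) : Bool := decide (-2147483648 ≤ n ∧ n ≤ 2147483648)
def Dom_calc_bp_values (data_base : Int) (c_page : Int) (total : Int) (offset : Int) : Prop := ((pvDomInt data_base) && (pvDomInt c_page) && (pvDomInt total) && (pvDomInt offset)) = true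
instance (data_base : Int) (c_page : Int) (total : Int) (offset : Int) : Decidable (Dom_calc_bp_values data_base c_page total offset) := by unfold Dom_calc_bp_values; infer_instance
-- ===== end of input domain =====

-- B replaces A's accumulate-and-break loop by a closed-form ceiling-division page count and a
-- direct fill of bp[c_page+i]; same return values on all of Pre_ (alternative decomposition, no speed claim).

-- ===== PORT A =====
-- A's `for p in range(c_page, 5)` with break; state (p, total, bp); fuel = 5 - p iterations remain.
-- Inside Pre_ (c_page >= -4) the tuple `(base, bp[p-1]+0x1000)[p > c_page]` never evaluates an
-- out-of-range bp[p-1], so the if/else with total pyGetD/pySetD is exact there.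
def pvLoopA (data_base c_page offset : Int) : Nat → Int → Int → List Int → List Int
  | 0, _, _, bp => bp
  | fuel+1, p, total, bp =>
    let bp' := PySem.List.pySetD bp p
      (if p > c_page then PySem.List.pyGetD bp (p-1) 0 + 0x1000
       else PySem.Int.band data_base 0xFFFFF000)
    let len := 4096 - (if p = c_page then offset else 0)
    if total ≤ len then bp' else pvLoopA data_base c_page offset fuel (p+1) (total - len) bp'

def calc_bp_values (data_base : Int) (c_page : Int) (total : Int) (offset : Int) : List Int :=
  pvLoopA data_base c_page offset (5 - c_page).toNat c_page total [0, 0, 0, 0, 0]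

-- ===== PORT B =====
-- loop body of Source B's `for i in range(count): bp[c_page + i] = base + 0x1000 * i`
def pvFillB (c_page base : Int) (bp : List Int) (i : Int) : List Int :=
  PySem.List.pySetD bp (c_page + i) (base + 0x1000 * i)

def calc_bp_values_alt (data_base : Int) (c_page : Int) (total : Int) (offset : Int) : List Int :=
  let base := PySem.Int.band data_base 0xFFFFF000
  let first := 4096 - offset
  let count := if total ≤ first then 1 else 1 - PySem.Int.floordiv (-(total - first)) 4096
  (PySem.List.pyRange 0 count 1).foldl (pvFillB c_page base) [0, 0, 0, 0, 0]

-- ===== PRECONDITION & SPEC =====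
-- Exactly the inputs on which Python A returns: both asserts hold AND c_page >= -4
-- (for c_page <= -5 A raises IndexError: the tuple evaluates bp[p-1] = bp[c_page-1]).
def Pre_calc_bp_values (data_base : Int) (c_page : Int) (total : Int) (offset : Int) : Prop :=
  -4 ≤ c_page ∧ c_page < 5 ∧ offset < 4096 ∧ total ≤ (5 - c_page) * 4096 - offset

instance (data_base : Int) (c_page : Int) (total : Int) (offset : Int) :
    Decidable (Pre_calc_bp_values data_base c_page total offset) := by
  unfold Pre_calc_bp_values; infer_instance

def pvWitness_calc_bp_values : Int × Int × Int × Int := (305419896, 0, 6000, 16)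

def Spec_calc_bp_values (data_base : Int) (c_page : Int) (total : Int) (offset : Int) (out : List Int) : Prop :=
  out = calc_bp_values_alt data_base c_page total offset

instance (data_base : Int) (c_page : Int) (total : Int) (offset : Int) (out : List Int) :
    Decidable (Spec_calc_bp_values data_base c_page total offset out) := by
  unfold Spec_calc_bp_values; infer_instance

-- ===== CLAIM (what is proved, stated in full; the proofs are below) =====
def Claim_equal_calc_bp_values : Prop := ∀ (data_base : Int) (c_page : Int) (total : Int) (offset : Int), Dom_calc_bp_values data_base c_page total offset → Pre_calc_bp_values data_base c_page total offset → Spec_calc_bp_values data_base c_page total offset (calc_bp_values data_base c_page total offset)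


-- ===== LEMMAS AND PROOFS =====

-- reading back the slot just written, for a length-5 list and a Python index in [-5, 5)
lemma pvGetSet (xs : List Int) (j v : Int) (h5 : xs.length = 5) (h1 : -5 ≤ j) (h2 : j < 5) :
    PySem.List.pyGetD (PySem.List.pySetD xs j v) j 0 = v := by
  rcases xs with _|⟨a,_|⟨b,_|⟨c,_|⟨d,_|⟨e,_|⟨f,t⟩⟩⟩⟩⟩⟩ <;> simp_all
  interval_cases j <;>
    simp [PySem.List.pySetD, PySem.List.pySet?, PySem.List.pyGetD, PySem.List.pyGet?,
      PySem.List.pyIdx?]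

-- the uniform phase of A's loop (pages after the first) equals B's fill loop from index i on
lemma pvLoopA_eq_fill (data_base c_page offset : Int) :
    ∀ (n : Nat) (i t : Int) (bp : List Int),
    bp.length = 5 → -4 ≤ c_page → 1 ≤ i → c_page + i ≤ 4 →
    (n : Int) = 4 - (c_page + i) + 1 →
    PySem.List.pyGetD bp (c_page + i - 1) 0
      = PySem.Int.band data_base 0xFFFFF000 + 0x1000 * (i - 1) →
    0 < t → t ≤ (5 - c_page - i) * 4096 →
    pvLoopA data_base c_page offset n (c_page + i) t bp
      = (PySem.List.pyRange i (i + -(PySem.Int.floordiv (-t) 4096)) 1).foldl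
          (pvFillB c_page (PySem.Int.band data_base 0xFFFFF000)) bp := by
  intro n
  induction n with
  | zero => intro i t bp _ _ _ _ hn _ _ _; exfalso; omega
  | succ m ih =>
    intro i t bp hlen hcp hi hle hn hinv ht hub
    have hgt : c_page + i > c_page := by omega
    have hne : ¬ (c_page + i = c_page) := by omega
    simp only [pvLoopA, if_pos hgt, if_neg hne, hinv]
    have hval : PySem.Int.band data_base 0xFFFFF000 + 0x1000 * (i - 1) + 0x1000
        = PySem.Int.band data_base 0xFFFFF000 + 0x1000 * i := by ring
    rw [hval]
    by_cases hsmall : t ≤ 4096 - 0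
    · rw [if_pos hsmall]
      have hc : -(PySem.Int.floordiv (-t) 4096) = 1 :=
        (PySem.Int.neg_floordiv_neg_eq_iff_of_pos (by norm_num)).mpr ⟨by omega, by omega⟩
      rw [hc, PySem.List.pyRange_one_singleton, List.foldl_cons, List.foldl_nil]
      rfl
    · rw [if_neg hsmall]
      have hle' : c_page + (i + 1) ≤ 4 := by omega
      have heq := ih (i + 1) (t - (4096 - 0))
        (PySem.List.pySetD bp (c_page + i)
          (PySem.Int.band data_base 0xFFFFF000 + 0x1000 * i))
        (by rw [PySem.List.length_pySetD]; exact hlen)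
        hcp (by omega) hle' (by omega)
        (by
          have : c_page + (i + 1) - 1 = c_page + i := by ring
          rw [this, pvGetSet _ _ _ hlen (by omega) (by omega)]
          ring)
        (by omega) (by push_cast; omega)
      have harg : c_page + i + 1 = c_page + (i + 1) := by ring
      rw [harg, heq]
      -- ceiling recurrence: C t = C (t - 4096) + 1 for t > 4096
      set q := -(PySem.Int.floordiv (-(t - (4096 - 0))) 4096) with hqdef
      have hq : (q - 1) * 4096 < t - (4096 - 0) ∧ t - (4096 - 0) ≤ q * 4096 :=
        (PySem.Int.neg_floordiv_neg_eq_iff_of_pos (by norm_num)).mp rfl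
      have hq1 : 1 ≤ q := by omega
      have hct : -(PySem.Int.floordiv (-t) 4096) = q + 1 :=
        (PySem.Int.neg_floordiv_neg_eq_iff_of_pos (by norm_num)).mpr ⟨by omega, by omega⟩
      rw [hct]
      have hcons : PySem.List.pyRange i (i + (q + 1)) 1
          = i :: PySem.List.pyRange (i + 1) (i + (q + 1)) 1 :=
        PySem.List.pyRange_one_cons (by omega)
      have hend : i + (q + 1) = (i + 1) + q := by ring
      rw [hcons, List.foldl_cons, hend]
      rfl

-- ===== VERDICT (by name: the statement is the Claim_ definition above) =====
theorem calc_bp_values_spec : Claim_equal_calc_bp_values := by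
  intro db cp t off _ hpre
  obtain ⟨h1, h2, h3, h4⟩ := hpre
  unfold Spec_calc_bp_values calc_bp_values calc_bp_values_alt
  have hfuel : (5 - cp).toNat = (4 - cp).toNat + 1 := by omega
  rw [hfuel]
  simp only [pvLoopA, gt_iff_lt, lt_irrefl, if_false, if_true]
  by_cases hT : t ≤ 4096 - off
  · rw [if_pos hT, if_pos hT]
    have hr : PySem.List.pyRange 0 1 1 = [0] := by decide
    rw [hr, List.foldl_cons, List.foldl_nil]
    simp [pvFillB]
  · rw [if_neg hT, if_neg hT]
    have hcp3 : cp ≤ 3 := by omega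
    have heq := pvLoopA_eq_fill db cp off ((4 - cp).toNat) 1 (t - (4096 - off))
      (PySem.List.pySetD [0, 0, 0, 0, 0] cp (PySem.Int.band db 0xFFFFF000))
      (by rw [PySem.List.length_pySetD]; rfl)
      h1 le_rfl (by omega) (by omega)
      (by
        have : cp + 1 - 1 = cp := by ring
        rw [this, pvGetSet _ _ _ rfl (by omega) (by omega)]
        ring)
      (by omega) (by omega)
    rw [heq]
    set q := -(PySem.Int.floordiv (-(t - (4096 - off))) 4096) with hqdef
    have hq : (q - 1) * 4096 < t - (4096 - off) ∧ t - (4096 - off) ≤ q * 4096 :=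
      (PySem.Int.neg_floordiv_neg_eq_iff_of_pos (by norm_num)).mp rfl
    have hcount : (1 : Int) - PySem.Int.floordiv (-(t - (4096 - off))) 4096 = 1 + q := by
      rw [hqdef]; ring
    rw [hcount]
    have hcons : PySem.List.pyRange 0 (1 + q) 1 = 0 :: PySem.List.pyRange 1 (1 + q) 1 := by
      have := PySem.List.pyRange_one_cons (a := 0) (b := 1 + q) (by omega)
      simpa using this
    rw [hcons, List.foldl_cons]
    have hfirst : pvFillB cp (PySem.Int.band db 0xFFFFF000) [0, 0, 0, 0, 0] 0
        = PySem.List.pySetD [0, 0, 0, 0, 0] cp (PySem.Int.band db 0xFFFFF000) := by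
      simp [pvFillB]
    rw [hfirst]
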